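-- pv_equiv track=rewrite | github.com/PlutoaCharon/LanQiaoCode_Python | 蓝桥杯官网试题/算法训练/石子游戏.py | solve
-- ===== SOURCE A (Python) =====
-- def solve(arr):
--     ans = 0
--     arr = sorted(arr)
--     for i in range(len(arr) - 1):
--         tmp = (arr[-1] + 1) * (arr[-2] + 1)
--         num = arr[-1] + arr[-2]
--         arr.pop()  # 将最后相加的石子堆弹出
--         arr.pop()  # 将最后相加的石子堆弹出
--         arr.append(num)
--         ans += tmp
--     return ans
-- ===== SOURCE B (Python) =====
-- def solve(arr):
--     # Combine piles largest-first with a scalar accumulator instead of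
--     # repeatedly popping/appending on the list.
--     s = sorted(arr)[::-1]
--     if not s:
--         return 0
--     ans = 0
--     acc = s[0]
--     for x in s[1:]:
--         ans += (acc + 1) * (x + 1)
--         acc += x
--     return ans
-- ===== Notes on version B (the rewrite author's own statement) =====
-- stated objective: simpler
-- what changed: Replaces A's per-iteration list mutation (two pops and an append on the sorted list, with negative indexing) by one descending pass that keeps the running combined pile in a scalar accumulator.
import Mathlib
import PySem

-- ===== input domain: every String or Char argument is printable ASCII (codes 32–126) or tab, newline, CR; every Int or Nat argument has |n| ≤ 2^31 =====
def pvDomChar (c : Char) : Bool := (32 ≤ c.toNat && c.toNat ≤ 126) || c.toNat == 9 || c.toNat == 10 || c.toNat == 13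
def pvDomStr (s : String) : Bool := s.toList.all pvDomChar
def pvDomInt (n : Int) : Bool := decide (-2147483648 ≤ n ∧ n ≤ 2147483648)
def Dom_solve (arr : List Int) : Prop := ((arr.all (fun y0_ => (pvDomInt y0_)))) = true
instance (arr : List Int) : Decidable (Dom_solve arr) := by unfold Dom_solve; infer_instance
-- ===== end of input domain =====

-- B replaces A's per-iteration list mutation (two pops and an append) by one
-- descending pass with a scalar accumulator; return values proved equal on all inputs.

-- ===== PORT A =====
-- loop body of A: reads arr[-1], arr[-2] (always in range while the loop runs,
-- so the getD default 0 is never used), pops twice, appends the sum.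
def solveStepA (st : List Int × Int) : List Int × Int :=
  let a := st.1
  let ans := st.2
  let tmp := (PySem.List.pyGetD a (-1) 0 + 1) * (PySem.List.pyGetD a (-2) 0 + 1)
  let num := PySem.List.pyGetD a (-1) 0 + PySem.List.pyGetD a (-2) 0
  let a := ((PySem.List.pop? a (-1)).getD (0, a)).2
  let a := ((PySem.List.pop? a (-1)).getD (0, a)).2
  let a := a ++ [num]
  (a, ans + tmp)

def solve (arr : List Int) : Int :=
  let arr0 := PySem.List.sorted arr (fun x => x) false
  let res := (PySem.List.pyRange 0 ((arr0.length : Int) - 1) 1).foldl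
    (fun st _ => solveStepA st) (arr0, 0)
  res.2

-- ===== PORT B =====
def solve_alt (arr : List Int) : Int :=
  let s := (PySem.List.slice? (PySem.List.sorted arr (fun x => x) false) none none (-1)).getD []
  match s with
  | [] => 0
  | a :: rest =>
    (rest.foldl (fun (p : Int × Int) x => (p.1 + (p.2 + 1) * (x + 1), p.2 + x)) ((0 : Int), a)).1

-- ===== PRECONDITION & SPEC =====
def Spec_solve (arr : List Int) (out : Int) : Prop := out = solve_alt arr
instance (arr : List Int) (out : Int) : Decidable (Spec_solve arr out) := by unfold Spec_solve; infer_instance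

-- ===== CLAIM (what is proved, stated in full; the proofs are below) =====
def Claim_equal_solve : Prop := ∀ (arr : List Int), Dom_solve arr → Spec_solve arr (solve arr)

-- ===== LEMMAS AND PROOFS =====

-- a fold that ignores the list elements is an iterate of the step function
theorem foldl_const_iterate {α β : Type} (g : α → α) (l : List β) (init : α) :
    l.foldl (fun st _ => g st) init = g^[l.length] init := by
  induction l generalizing init with
  | nil => rfl
  | cons x t ih => simp [List.foldl_cons, ih, Function.iterate_succ_apply]

-- one step of A on the state  m'.reverse ++ [x, acc]  (descending remaining x :: m',
-- running pile acc): combines acc with x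
theorem stepA_shape (m' : List Int) (x acc ans : Int) :
    solveStepA (m'.reverse ++ [x, acc], ans) =
      (m'.reverse ++ [acc + x], ans + (acc + 1) * (x + 1)) := by
  have h2 : PySem.List.pyGetD (m'.reverse ++ [x, acc]) (-2) 0 = x := by
    rw [show m'.reverse ++ [x, acc] = (m'.reverse ++ [x]) ++ [acc] by simp,
      PySem.List.pyGetD_neg_ofNat _ 2 0 (by omega) (by simp)]
    simp
  have h1 : PySem.List.pyGetD (m'.reverse ++ [x, acc]) (-1) 0 = acc := by
    rw [show m'.reverse ++ [x, acc] = (m'.reverse ++ [x]) ++ [acc] by simp,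
      PySem.List.pyGetD_neg_one_append_singleton]
  have hp1 : PySem.List.pop? (m'.reverse ++ [x, acc]) (-1) = some (acc, m'.reverse ++ [x]) := by
    rw [show m'.reverse ++ [x, acc] = (m'.reverse ++ [x]) ++ [acc] by simp]
    exact PySem.List.pop?_last _ _
  have hp2 : PySem.List.pop? (m'.reverse ++ [x]) (-1) = some (x, m'.reverse) :=
    PySem.List.pop?_last _ _
  simp only [solveStepA, h1, h2, hp1, hp2, Option.getD_some]

-- invariant: running A's loop |m| times on state (m.reverse ++ [acc], ans), where m is
-- the descending list of not-yet-combined piles, yields B's fold over m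
theorem iterA_eq_foldB (m : List Int) (acc ans : Int) :
    (solveStepA^[m.length] (m.reverse ++ [acc], ans)).2 =
      (m.foldl (fun (p : Int × Int) x => (p.1 + (p.2 + 1) * (x + 1), p.2 + x)) (ans, acc)).1 := by
  induction m generalizing acc ans with
  | nil => simp
  | cons x m' ih =>
    have : (x :: m').reverse ++ [acc] = m'.reverse ++ [x, acc] := by simp
    rw [this, List.length_cons, Function.iterate_succ_apply, stepA_shape, ih, List.foldl_cons]

theorem solve_eq_alt (arr : List Int) : solve arr = solve_alt arr := by
  unfold solve solve_alt
  rw [PySem.List.slice?_none_none_neg_one, Option.getD_some]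
  rcases h : (PySem.List.sorted arr (fun x => x) false).reverse with _ | ⟨a, rest⟩
  · have hnil : PySem.List.sorted arr (fun x => x) false = [] := by
      simpa using congrArg List.reverse h
    dsimp only
    simp [hnil, PySem.List.pyRange]
  · have hs : PySem.List.sorted arr (fun x => x) false = rest.reverse ++ [a] := by
      have := congrArg List.reverse h
      simpa using this
    rw [hs]
    dsimp only
    have hlen : ((rest.reverse ++ [a]).length : Int) - 1 = (rest.length : Int) := by
      simp
    rw [hlen, PySem.List.pyRange_zero_natCast, foldl_const_iterate]
    simp only [List.length_map, List.length_range]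
    exact iterA_eq_foldB rest a 0

-- ===== VERDICT (by name: the statement is the Claim_ definition above) =====
theorem solve_spec : Claim_equal_solve := by
  intro arr _
  unfold Spec_solve
  exact solve_eq_alt arr
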